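-- pv_equiv track=rewrite | github.com/yuezhao-zy/DPR_Offical | utils.py | drop_duplicate
-- ===== SOURCE A (Python) =====
-- def drop_duplicate(ret,drop_subseq=True):
--     d_ret = []
--
--     ret = sorted(ret, key=lambda i: len(i), reverse=True)
--     for i in range(len(ret)):
--         exist_ = False
--         for j in range(i):
--             if drop_subseq:
--                 if ret[i] in ret[j]:
--                     exist_ = True
--                     break
--             else:
--                 if ret[i] == ret[j]:
--                     exist_ = True
--                     break
--
--         if not exist_:
--             d_ret.append(ret[i])
--
--     return d_ret
-- ===== SOURCE B (Python) =====
-- def drop_duplicate(ret, drop_subseq=True):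
--     d_ret = []
--     for item in sorted(ret, key=lambda i: len(i), reverse=True):
--         if drop_subseq:
--             dup = any(item in kept for kept in d_ret)
--         else:
--             dup = any(item == kept for kept in d_ret)
--         if not dup:
--             d_ret.append(item)
--     return d_ret
-- ===== Notes on version B (the rewrite author's own statement) =====
-- stated objective: simpler
-- what changed: Instead of comparing each sorted item against every earlier sorted item (index-based nested range loop with a break flag), B builds the result in one pass and tests each item only against the strings already KEPT, relying on transitivity of substring containment.
import Mathlib
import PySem

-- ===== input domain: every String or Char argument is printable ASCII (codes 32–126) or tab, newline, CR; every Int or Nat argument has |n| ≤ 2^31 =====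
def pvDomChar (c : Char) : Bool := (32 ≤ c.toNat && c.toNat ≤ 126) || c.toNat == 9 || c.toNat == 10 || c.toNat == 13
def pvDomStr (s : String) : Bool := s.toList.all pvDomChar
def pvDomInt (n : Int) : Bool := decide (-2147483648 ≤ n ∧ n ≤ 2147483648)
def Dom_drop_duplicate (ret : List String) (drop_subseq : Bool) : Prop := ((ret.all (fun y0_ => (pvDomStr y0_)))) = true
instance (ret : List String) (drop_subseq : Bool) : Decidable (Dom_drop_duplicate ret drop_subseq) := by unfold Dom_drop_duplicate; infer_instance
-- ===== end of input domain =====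

-- B replaces A's index-based scan over ALL earlier sorted items with a single pass that
-- tests each item only against the strings already kept (simpler decomposition; equal by
-- transitivity of substring containment).


-- ===== PORT A =====
-- inner 'for j in range(i): … break' over the earlier elements ret[0..i-1] (= pref)
def ddInnerA (pref : List String) (x : String) (ds : Bool) : Bool :=
  match pref with
  | [] => false
  | y :: rest =>
    if (if ds then PySem.Str.isIn x y else x == y) then true else ddInnerA rest x ds

-- outer 'for i in range(len(ret))': pending = ret[i:], pref = ret[:i], d_ret the accumulator
def ddLoopA (pending pref d_ret : List String) (ds : Bool) : List String :=
  match pending with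
  | [] => d_ret
  | x :: rest =>
    ddLoopA rest (pref ++ [x]) (if ddInnerA pref x ds then d_ret else d_ret ++ [x]) ds

def drop_duplicate (ret : List String) (drop_subseq : Bool) : List String :=
  ddLoopA (PySem.List.sorted ret (fun i => PySem.Str.len i) true) [] [] drop_subseq

-- ===== PORT B =====
def ddLoopB (pending d_ret : List String) (ds : Bool) : List String :=
  match pending with
  | [] => d_ret
  | x :: rest =>
    if d_ret.any (fun k => if ds then PySem.Str.isIn x k else x == k) then
      ddLoopB rest d_ret ds
    else
      ddLoopB rest (d_ret ++ [x]) ds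

def drop_duplicate_alt (ret : List String) (drop_subseq : Bool) : List String :=
  ddLoopB (PySem.List.sorted ret (fun i => PySem.Str.len i) true) [] drop_subseq

-- ===== PRECONDITION & SPEC =====
def Spec_drop_duplicate (ret : List String) (drop_subseq : Bool) (out : List String) : Prop := out = drop_duplicate_alt ret drop_subseq
instance (ret : List String) (drop_subseq : Bool) (out : List String) : Decidable (Spec_drop_duplicate ret drop_subseq out) := by unfold Spec_drop_duplicate; infer_instance

-- ===== CLAIM (what is proved, stated in full; the proofs are below) =====
def Claim_equal_drop_duplicate : Prop := ∀ (ret : List String) (drop_subseq : Bool), Dom_drop_duplicate ret drop_subseq → Spec_drop_duplicate ret drop_subseq (drop_duplicate ret drop_subseq)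

-- ===== LEMMAS AND PROOFS =====

-- the relation both programs test: 'x in y' (ds = true) or 'x == y' (ds = false)
def ddRel (ds : Bool) (x y : String) : Prop :=
  if ds then x.toList <:+: y.toList else x = y

theorem ddRel_refl (ds : Bool) (x : String) : ddRel ds x x := by
  cases ds <;> simp [ddRel]

theorem ddRel_trans (ds : Bool) {x y z : String}
    (h1 : ddRel ds x y) (h2 : ddRel ds y z) : ddRel ds x z := by
  cases ds <;> simp [ddRel] at *
  · exact h1.trans h2
  · exact h1.trans h2

theorem ddTest_iff (ds : Bool) (x y : String) :
    ((if ds then PySem.Str.isIn x y else x == y) = true) ↔ ddRel ds x y := by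
  cases ds
  · simp [ddRel]
  · simp [ddRel, PySem.Chars.isIn_iff_infix]

theorem ddInnerA_iff (pref : List String) (x : String) (ds : Bool) :
    ddInnerA pref x ds = true ↔ ∃ y ∈ pref, ddRel ds x y := by
  induction pref with
  | nil => simp [ddInnerA]
  | cons y rest ih =>
    by_cases h : (if ds then PySem.Str.isIn x y else x == y) = true
    · have hA : ddInnerA (y :: rest) x ds = true := by unfold ddInnerA; rw [if_pos h]
      rw [hA]
      simp only [true_iff]
      exact ⟨y, List.mem_cons_self, (ddTest_iff ds x y).mp h⟩
    · have hA : ddInnerA (y :: rest) x ds = ddInnerA rest x ds := by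
        conv_lhs => rw [ddInnerA]
        rw [if_neg h]
      rw [hA, ih]
      constructor
      · rintro ⟨z, hz, hr⟩; exact ⟨z, List.mem_cons_of_mem _ hz, hr⟩
      · rintro ⟨z, hz, hr⟩
        rcases List.mem_cons.mp hz with hz | hz
        · exact absurd ((ddTest_iff ds x y).mpr (hz ▸ hr)) h
        · exact ⟨z, hz, hr⟩

theorem ddAnyB_iff (d_ret : List String) (x : String) (ds : Bool) :
    (d_ret.any (fun k => if ds then PySem.Str.isIn x k else x == k)) = true
      ↔ ∃ k ∈ d_ret, ddRel ds x k := by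
  simp only [List.any_eq_true]
  constructor
  · rintro ⟨k, hk, h⟩; exact ⟨k, hk, (ddTest_iff ds x k).mp h⟩
  · rintro ⟨k, hk, h⟩; exact ⟨k, hk, (ddTest_iff ds x k).mpr h⟩

-- main invariant: kept strings are among the earlier ones, and every earlier string is
-- related (ddRel) to some kept string; then A's scan over pref equals B's scan over d_ret.
theorem ddLoop_eq (ds : Bool) :
    ∀ (pending pref d_ret : List String),
      (∀ k ∈ d_ret, k ∈ pref) →
      (∀ y ∈ pref, ∃ k ∈ d_ret, ddRel ds y k) →
      ddLoopA pending pref d_ret ds = ddLoopB pending d_ret ds := by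
  intro pending
  induction pending with
  | nil => intro pref d_ret _ _; rfl
  | cons x rest ih =>
    intro pref d_ret hsub hcov
    have hb : ddInnerA pref x ds
        = d_ret.any (fun k => if ds then PySem.Str.isIn x k else x == k) := by
      by_cases h : ddInnerA pref x ds = true
      · obtain ⟨y, hy, hr⟩ := (ddInnerA_iff pref x ds).mp h
        obtain ⟨k, hk, hr2⟩ := hcov y hy
        rw [h]
        exact ((ddAnyB_iff d_ret x ds).mpr ⟨k, hk, ddRel_trans ds hr hr2⟩).symm
      · have h2 : (d_ret.any (fun k => if ds then PySem.Str.isIn x k else x == k)) ≠ true := by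
          intro hc
          obtain ⟨k, hk, hr⟩ := (ddAnyB_iff d_ret x ds).mp hc
          exact h ((ddInnerA_iff pref x ds).mpr ⟨k, hsub k hk, hr⟩)
        rw [Bool.eq_false_iff.mpr h, Bool.eq_false_iff.mpr h2]
    by_cases h : (d_ret.any (fun k => if ds then PySem.Str.isIn x k else x == k)) = true
    · simp only [ddLoopA, ddLoopB]
      rw [hb, if_pos h, if_pos h]
      apply ih (pref ++ [x]) d_ret
      · intro k hk; exact List.mem_append_left _ (hsub k hk)
      · intro y hy
        rcases List.mem_append.mp hy with hy | hy
        · exact hcov y hy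
        · obtain ⟨k, hk, hr⟩ := (ddAnyB_iff d_ret x ds).mp h
          have : y = x := List.mem_singleton.mp hy
          exact ⟨k, hk, this ▸ hr⟩
    · simp only [ddLoopA, ddLoopB]
      rw [hb, if_neg h, if_neg h]
      apply ih (pref ++ [x]) (d_ret ++ [x])
      · intro k hk
        rcases List.mem_append.mp hk with hk | hk
        · exact List.mem_append_left _ (hsub k hk)
        · exact List.mem_append_right _ hk
      · intro y hy
        rcases List.mem_append.mp hy with hy | hy
        · obtain ⟨k, hk, hr⟩ := hcov y hy
          exact ⟨k, List.mem_append_left _ hk, hr⟩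
        · have : y = x := List.mem_singleton.mp hy
          exact ⟨x, List.mem_append_right _ (List.mem_singleton_self x), this ▸ ddRel_refl ds x⟩

-- ===== VERDICT (by name: the statement is the Claim_ definition above) =====
theorem drop_duplicate_spec : Claim_equal_drop_duplicate := by
  intro ret ds _
  show drop_duplicate ret ds = drop_duplicate_alt ret ds
  unfold drop_duplicate drop_duplicate_alt
  exact ddLoop_eq ds _ [] [] (by simp) (by simp)
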